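-- pv_equiv track=rewrite | github.com/supplementary-archive/Appendix | Appendix E Python Implementation Code/m12_ism_diagraph.py | filter_edges_by_levels
-- ===== SOURCE A (Python) =====
-- def filter_edges_by_levels(edges, factor_levels):
--     """
--     Categorize edges based on level relationships.
--
--     Parameters:
--     -----------
--     edges : list
--         List of (from_index, to_index) tuples
--     factor_levels : dict
--         Dict mapping factor index to level
--
--     Returns:
--     --------
--     dict
--         Dictionary with categorized edges:
--         - 'inter_level': Edges between different levels
--         - 'intra_level': Edges within same level
--         - 'upward': Edges pointing to higher level (cause to effect)
--         - 'downward': Edges pointing to lower level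
--     """
--     inter_level = []
--     intra_level = []
--     upward = []  # From higher level number to lower (cause to effect)
--     downward = []
--
--     for from_idx, to_idx in edges:
--         from_level = factor_levels.get(from_idx, 0)
--         to_level = factor_levels.get(to_idx, 0)
--
--         if from_level == to_level:
--             intra_level.append((from_idx, to_idx))
--         else:
--             inter_level.append((from_idx, to_idx))
--             if from_level > to_level:
--                 upward.append((from_idx, to_idx))  # Cause → Effect
--             else:
--                 downward.append((from_idx, to_idx))
--
--     return {
--         'inter_level': inter_level,
--         'intra_level': intra_level,
--         'upward': upward,
--         'downward': downward,
--         'all': edges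
--     }
-- ===== SOURCE B (Python) =====
-- def filter_edges_by_levels(edges, factor_levels):
--     level = lambda i: factor_levels.get(i, 0)
--     return {
--         'inter_level': [e for e in edges if level(e[0]) != level(e[1])],
--         'intra_level': [e for e in edges if level(e[0]) == level(e[1])],
--         'upward': [e for e in edges if level(e[0]) > level(e[1])],
--         'downward': [e for e in edges if level(e[0]) < level(e[1])],
--         'all': edges
--     }
-- ===== Notes on version B (the rewrite author's own statement) =====
-- stated objective: simpler
-- what changed: Replaces the single accumulating loop over four mutable lists with four independent filter passes, one per category, assembled directly into the result dict.
import Mathlib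
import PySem

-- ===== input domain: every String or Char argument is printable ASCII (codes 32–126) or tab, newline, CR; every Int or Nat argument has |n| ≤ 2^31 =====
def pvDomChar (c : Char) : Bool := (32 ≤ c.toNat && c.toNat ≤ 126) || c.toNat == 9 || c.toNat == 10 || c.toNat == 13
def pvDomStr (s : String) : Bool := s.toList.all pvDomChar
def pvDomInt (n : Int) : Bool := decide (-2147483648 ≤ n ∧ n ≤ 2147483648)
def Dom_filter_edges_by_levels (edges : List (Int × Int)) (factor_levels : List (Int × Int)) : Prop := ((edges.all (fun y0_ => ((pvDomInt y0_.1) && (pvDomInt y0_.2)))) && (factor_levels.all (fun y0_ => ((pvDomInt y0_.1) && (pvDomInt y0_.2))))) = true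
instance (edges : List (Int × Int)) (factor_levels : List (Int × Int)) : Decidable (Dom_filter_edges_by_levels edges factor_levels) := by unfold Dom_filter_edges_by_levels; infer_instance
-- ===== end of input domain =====

-- B replaces A's single categorizing loop with four independent filter passes, one per category (objective: simpler decomposition, same cost).


-- ===== PORT A =====
-- factor_levels.get(k, 0): first-match lookup in the association list (dict convention)
def lvlGet (factor_levels : List (Int × Int)) (k : Int) : Int :=
  ((factor_levels.find? (fun p => p.1 == k)).map Prod.snd).getD 0

-- literal port of A: one fold over edges carrying (inter, intra, upward, downward)
def filter_edges_by_levels (edges : List (Int × Int)) (factor_levels : List (Int × Int)) : List (String × List (Int × Int)) :=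
  let st := edges.foldl (fun (s : List (Int × Int) × List (Int × Int) × List (Int × Int) × List (Int × Int)) e =>
    let from_level := lvlGet factor_levels e.1
    let to_level := lvlGet factor_levels e.2
    if from_level = to_level then
      (s.1, s.2.1 ++ [e], s.2.2.1, s.2.2.2)
    else if from_level > to_level then
      (s.1 ++ [e], s.2.1, s.2.2.1 ++ [e], s.2.2.2)
    else
      (s.1 ++ [e], s.2.1, s.2.2.1, s.2.2.2 ++ [e])) ([], [], [], [])
  [("inter_level", st.1), ("intra_level", st.2.1), ("upward", st.2.2.1), ("downward", st.2.2.2), ("all", edges)]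

-- ===== PORT B =====
-- port of B: four independent filter passes, one per category (objective: simpler decomposition)
def filter_edges_by_levels_alt (edges : List (Int × Int)) (factor_levels : List (Int × Int)) : List (String × List (Int × Int)) :=
  let lv := fun (i : Int) => lvlGet factor_levels i
  [("inter_level", edges.filter (fun e => lv e.1 ≠ lv e.2)),
   ("intra_level", edges.filter (fun e => lv e.1 = lv e.2)),
   ("upward", edges.filter (fun e => lv e.1 > lv e.2)),
   ("downward", edges.filter (fun e => lv e.1 < lv e.2)),
   ("all", edges)]

-- ===== PRECONDITION & SPEC =====
def Spec_filter_edges_by_levels (edges : List (Int × Int)) (factor_levels : List (Int × Int)) (out : List (String × List (Int × Int))) : Prop := out = filter_edges_by_levels_alt edges factor_levels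
instance (edges : List (Int × Int)) (factor_levels : List (Int × Int)) (out : List (String × List (Int × Int))) : Decidable (Spec_filter_edges_by_levels edges factor_levels out) := by unfold Spec_filter_edges_by_levels; infer_instance

-- ===== CLAIM (what is proved, stated in full; the proofs are below) =====
def Claim_equal_filter_edges_by_levels : Prop := ∀ (edges : List (Int × Int)) (factor_levels : List (Int × Int)), Dom_filter_edges_by_levels edges factor_levels → Spec_filter_edges_by_levels edges factor_levels (filter_edges_by_levels edges factor_levels)

-- ===== LEMMAS AND PROOFS =====

-- loop invariant: the fold extends each accumulator by the corresponding filter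
theorem fold_invariant (factor_levels : List (Int × Int)) (edges : List (Int × Int))
    (a b c d : List (Int × Int)) :
    edges.foldl (fun (s : List (Int × Int) × List (Int × Int) × List (Int × Int) × List (Int × Int)) e =>
      let from_level := lvlGet factor_levels e.1
      let to_level := lvlGet factor_levels e.2
      if from_level = to_level then
        (s.1, s.2.1 ++ [e], s.2.2.1, s.2.2.2)
      else if from_level > to_level then
        (s.1 ++ [e], s.2.1, s.2.2.1 ++ [e], s.2.2.2)
      else
        (s.1 ++ [e], s.2.1, s.2.2.1, s.2.2.2 ++ [e])) (a, b, c, d)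
    = (a ++ edges.filter (fun e => lvlGet factor_levels e.1 ≠ lvlGet factor_levels e.2),
       b ++ edges.filter (fun e => lvlGet factor_levels e.1 = lvlGet factor_levels e.2),
       c ++ edges.filter (fun e => lvlGet factor_levels e.1 > lvlGet factor_levels e.2),
       d ++ edges.filter (fun e => lvlGet factor_levels e.1 < lvlGet factor_levels e.2)) := by
  induction edges generalizing a b c d with
  | nil => simp
  | cons e es ih =>
    simp only [List.foldl_cons, List.filter_cons]
    by_cases h1 : lvlGet factor_levels e.1 = lvlGet factor_levels e.2
    · simp [h1, ih]
    · by_cases h2 : lvlGet factor_levels e.1 > lvlGet factor_levels e.2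
      · have h3 : ¬ lvlGet factor_levels e.1 < lvlGet factor_levels e.2 := by omega
        simp [h1, h2, h3, ih]
      · have h3 : lvlGet factor_levels e.1 < lvlGet factor_levels e.2 := by omega
        simp [h1, h2, h3, ih]

-- ===== VERDICT (by name: the statement is the Claim_ definition above) =====
theorem filter_edges_by_levels_spec : Claim_equal_filter_edges_by_levels := by
  intro edges factor_levels _
  unfold Spec_filter_edges_by_levels filter_edges_by_levels filter_edges_by_levels_alt
  simp [fold_invariant]
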